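-- pv_equiv track=rewrite | github.com/DanielRubioCamargo/Exercicios | Codigos em Python/Pizzaria/funcoes.py | choose_product
-- ===== SOURCE A (Python) =====
-- def choose_product(productList : list,chosenOption : int):
--     correctOption = chosenOption - 1
--     for i,c in enumerate(productList):
--         if i == correctOption:
--             return c
--             break
--         elif i == len(productList) - 1:
--             return ""
-- ===== SOURCE B (Python) =====
-- def choose_product(productList: list, chosenOption: int):
--     i = chosenOption - 1
--     return productList[i] if 0 <= i < len(productList) else ""
-- ===== Notes on version B (the rewrite author's own statement) =====
-- stated objective: faster
-- what changed: Replaces the linear enumerate scan with a single O(1) bounds check and direct indexing; Pre_ excludes the empty list, where A falls off the loop and returns None (not a string) while B returns "".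
-- outside the precondition, e.g. on choose_product([], 1): A returns None, B returns ''
import Mathlib
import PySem

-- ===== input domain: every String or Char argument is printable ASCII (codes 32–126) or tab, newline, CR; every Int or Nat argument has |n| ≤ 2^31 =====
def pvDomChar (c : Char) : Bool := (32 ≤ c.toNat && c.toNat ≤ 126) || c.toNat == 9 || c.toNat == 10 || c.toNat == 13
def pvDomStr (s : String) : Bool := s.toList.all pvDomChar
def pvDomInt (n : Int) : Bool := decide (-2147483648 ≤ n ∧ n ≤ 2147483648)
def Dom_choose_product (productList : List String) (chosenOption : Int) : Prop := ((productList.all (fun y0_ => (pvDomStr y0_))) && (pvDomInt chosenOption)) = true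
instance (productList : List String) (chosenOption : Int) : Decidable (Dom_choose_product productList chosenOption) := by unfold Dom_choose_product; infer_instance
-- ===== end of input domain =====

-- B replaces A's linear enumerate scan with a single bounds check and direct indexing (simpler).
-- Pre_ excludes the empty list, on which A falls off the loop and returns None (no string value).


-- ===== PORT A =====
-- the 'for i,c in enumerate(productList)' loop, carrying the running index i;
-- falling off the loop (only possible for the empty list) yields Python's None — outside Pre_, default "".
def chooseGo (len1 correctOption : Int) (i : Nat) : List String → String
  | [] => ""
  | c :: rest =>
    if (i : Int) = correctOption then c
    else if (i : Int) = len1 then ""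
    else chooseGo len1 correctOption (i + 1) rest

def choose_product (productList : List String) (chosenOption : Int) : String :=
  let correctOption := chosenOption - 1
  chooseGo ((productList.length : Int) - 1) correctOption 0 productList

-- ===== PORT B =====
def choose_product_alt (productList : List String) (chosenOption : Int) : String :=
  let i := chosenOption - 1
  if 0 ≤ i ∧ i < (productList.length : Int) then (PySem.List.pyGet? productList i).getD "" else ""

-- ===== PRECONDITION & SPEC =====
-- Pre_ excludes only the empty list, on which A returns None (not a value of type String).
def Pre_choose_product (productList : List String) (chosenOption : Int) : Prop := productList ≠ []
instance (productList : List String) (chosenOption : Int) : Decidable (Pre_choose_product productList chosenOption) := by unfold Pre_choose_product; infer_instance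
def pvWitness_choose_product : List String × Int := (["margherita", "calabresa"], 2)

def Spec_choose_product (productList : List String) (chosenOption : Int) (out : String) : Prop := out = choose_product_alt productList chosenOption
instance (productList : List String) (chosenOption : Int) (out : String) : Decidable (Spec_choose_product productList chosenOption out) := by unfold Spec_choose_product; infer_instance

-- ===== CLAIM (what is proved, stated in full; the proofs are below) =====
def Claim_equal_choose_product : Prop := ∀ (productList : List String) (chosenOption : Int), Dom_choose_product productList chosenOption → Pre_choose_product productList chosenOption → Spec_choose_product productList chosenOption (choose_product productList chosenOption)

-- ===== LEMMAS AND PROOFS =====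

-- invariant of A's loop: starting at index i with the remaining suffix 'rest' of a list of
-- length len1+1, the loop returns the element correctOption-i into rest if i ≤ correctOption ≤ len1, else "".
theorem chooseGo_spec (len1 correctOption : Int) :
    ∀ (rest : List String) (i : Nat), rest ≠ [] → (i : Int) + rest.length = len1 + 1 →
      chooseGo len1 correctOption i rest =
        if (i : Int) ≤ correctOption ∧ correctOption ≤ len1 then
          (PySem.List.pyGet? rest (correctOption - i)).getD "" else ""
  | [], _, h, _ => absurd rfl h
  | [c], i, _, hlen => by
      have hi : (i : Int) = len1 := by simp at hlen; omega
      unfold chooseGo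
      by_cases hc : (i : Int) = correctOption
      · rw [if_pos hc, if_pos ⟨le_of_eq hc, by omega⟩]
        have : correctOption - (i : Int) = 0 := by omega
        rw [this, PySem.List.pyGet?_zero_cons]
        rfl
      · rw [if_neg hc, if_pos hi, if_neg (by omega : ¬ ((i : Int) ≤ correctOption ∧ correctOption ≤ len1))]
  | c :: c' :: rest, i, _, hlen => by
      have hlen' : (i : Int) + (rest.length : Int) + 2 = len1 + 1 := by
        simp only [List.length_cons] at hlen; push_cast at hlen; omega
      unfold chooseGo
      by_cases hc : (i : Int) = correctOption
      · rw [if_pos hc, if_pos ⟨le_of_eq hc, by omega⟩]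
        have : correctOption - (i : Int) = 0 := by omega
        rw [this, PySem.List.pyGet?_zero_cons]
        rfl
      · have hi : ¬ (i : Int) = len1 := by omega
        rw [if_neg hc, if_neg hi]
        rw [chooseGo_spec len1 correctOption (c' :: rest) (i + 1) (by simp) (by simp only [List.length_cons]; push_cast; omega)]
        by_cases hr : (i : Int) + 1 ≤ correctOption ∧ correctOption ≤ len1
        · rw [if_pos (by push_cast; omega), if_pos (by omega : (i : Int) ≤ correctOption ∧ correctOption ≤ len1)]
          have h1 : correctOption - (i : Int) = ((correctOption - ((i : Int) + 1)).toNat : Int) + 1 := by omega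
          have h2 : correctOption - ((i + 1 : Nat) : Int) = ((correctOption - ((i : Int) + 1)).toNat : Int) := by push_cast; omega
          rw [h1, h2, PySem.List.pyGet?_cons_succ]
        · rw [if_neg (by push_cast; omega), if_neg (by omega : ¬ ((i : Int) ≤ correctOption ∧ correctOption ≤ len1))]

-- ===== VERDICT (by name: the statement is the Claim_ definition above) =====
theorem choose_product_spec : Claim_equal_choose_product := by
  intro productList chosenOption _ hpre
  unfold Spec_choose_product choose_product choose_product_alt
  have h := chooseGo_spec ((productList.length : Int) - 1) (chosenOption - 1) productList 0 hpre (by simp)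
  simp only [Nat.cast_zero, Int.sub_zero] at h
  rw [h]
  have hlen : productList.length ≠ 0 := by
    intro h0; exact hpre (List.eq_nil_of_length_eq_zero h0)
  by_cases hc : (0 : Int) ≤ chosenOption - 1 ∧ chosenOption - 1 < (productList.length : Int)
  · have hc' : (0:Int) ≤ chosenOption - 1 ∧ chosenOption - 1 ≤ (productList.length : Int) - 1 := by omega
    simp [hc, hc'.2]
  · have hc' : ¬ ((0:Int) ≤ chosenOption - 1 ∧ chosenOption - 1 ≤ (productList.length : Int) - 1) := by omega
    simp only [if_neg hc']
    rw [if_neg]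
    exact fun h => hc' ⟨h.1, by omega⟩
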